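-- pv_equiv track=rewrite | github.com/MegaGiciorPortas/WDI-Zadania | 02-tablice_jednowymiarowe/2.87.py | sprawdzanie_napisu
-- ===== SOURCE A (Python) =====
-- def najwiekszy_dzielnik_mniejszy_od_niej_samej(n):
--     i = 2
--     while i * i <= n:
--         if n % i == 0:
--             return n // i
--         i += 1
--     return 1
--
-- def porownywanie_napisow(napis1, napis2):
--     dlugosc_napis2 = len(napis2)
--     for i in range(len(napis1)):
--         if napis1[i] != napis2[i % dlugosc_napis2]:
--             return False
--     return True
--
-- def sprawdzanie_napisu(napis):
--     dlugosc_napisu = len(napis)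
--     meta = najwiekszy_dzielnik_mniejszy_od_niej_samej(dlugosc_napisu)
--     for i in range(meta):
--         fragment = napis[:i + 1]
--
--         if porownywanie_napisow(napis, fragment):
--             return True
--     return False
-- ===== SOURCE B (Python) =====
-- def sprawdzanie_napisu(napis):
--     n = len(napis)
--     if n == 0:
--         return True
--     # KMP prefix function: pi[i] = length of longest proper border of napis[:i+1]
--     pi = [0] * n
--     k = 0
--     for i in range(1, n):
--         while k > 0 and napis[i] != napis[k]:
--             k = pi[k - 1]
--         if napis[i] == napis[k]:
--             k += 1
--         pi[i] = k
--     okres = n - pi[n - 1]          # smallest weak period of napis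
--     meta = 1                       # largest proper divisor of n (1 if n prime)
--     d = 2
--     while d * d <= n:
--         if n % d == 0:
--             meta = n // d
--             break
--         d += 1
--     return okres <= meta
-- ===== Notes on version B (the rewrite author's own statement) =====
-- stated objective: faster
-- what changed: A tries every candidate period p = 1..meta and rescans the whole string for each; B computes the smallest period once via the KMP prefix function (smallest period = n - pi[n-1]) and compares it with meta, the largest proper divisor of n.
import Mathlib
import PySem

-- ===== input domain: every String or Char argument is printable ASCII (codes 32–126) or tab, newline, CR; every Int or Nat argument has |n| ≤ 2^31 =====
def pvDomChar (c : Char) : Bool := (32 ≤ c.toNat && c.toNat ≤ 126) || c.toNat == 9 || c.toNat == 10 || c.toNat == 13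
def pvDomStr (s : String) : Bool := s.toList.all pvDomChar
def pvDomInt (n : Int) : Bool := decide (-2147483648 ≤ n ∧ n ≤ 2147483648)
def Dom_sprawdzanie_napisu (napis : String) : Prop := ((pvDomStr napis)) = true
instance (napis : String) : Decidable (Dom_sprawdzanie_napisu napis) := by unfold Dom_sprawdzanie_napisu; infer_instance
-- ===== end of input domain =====

-- B replaces A's O(n·mt) scan over all candidate periods by the KMP prefix function
-- (smallest period = n - pi[n-1], compared with the largest proper divisor of n): objective = faster.

-- ===== PORT A =====

-- while i * i <= n: if n % i == 0: return n // i; i += 1; return 1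
def najdAux (n i : Int) : Int :=
  if i * i ≤ n then
    if PySem.Int.mod n i = 0 then PySem.Int.floordiv n i
    else najdAux n (i + 1)
  else 1
termination_by (n + 2 - i).toNat
decreasing_by
  rename_i h
  have h2 : i ≤ n + 1 := by nlinarith [mul_self_nonneg (i - 1)]
  omega

-- for i in range(len(napis1)): if napis1[i] != napis2[i % len(napis2)]: return False; return True
-- (indices are in range at every call A makes, so plain getD is exact there)
def porAux (l1 l2 : List Char) (i : Nat) : Bool :=
  if i < l1.length then
    if l1.getD i default ≠ l2.getD (i % l2.length) default then false
    else porAux l1 l2 (i + 1)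
  else true
termination_by l1.length - i

-- for i in range(meta): fragment = napis[:i+1]; if porownywanie_napisow(napis, fragment): return True
def sprLoop (l : List Char) (mt i : Int) : Bool :=
  if i < mt then
    let fragment := PySem.List.slice l none (some (i + 1))
    if porAux l fragment 0 then true else sprLoop l mt (i + 1)
  else false
termination_by (mt - i).toNat

def sprawdzanie_napisu (napis : String) : Bool :=
  let l := napis.toList
  let mt := najdAux (l.length : Int) 2
  sprLoop l mt 0

-- ===== PORT B =====

-- while k > 0 and napis[i] != napis[k]: k = pi[k-1]   (fuel = the initial k: each step strictly decreases k)
def kmpFall (pi : Array Nat) (l : List Char) (c : Char) : Nat → Nat → Nat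
  | 0, k => k
  | fuel + 1, k =>
    if 0 < k ∧ c ≠ l.getD k default then kmpFall pi l c fuel (pi.getD (k - 1) 0)
    else k

-- for i in range(1, n): …; pi[i] = k   (pi built left to right, so pi[i] = ... becomes a push)
def kmpLoop (l : List Char) (i : Nat) (pi : Array Nat) (k : Nat) : Array Nat :=
  if i < l.length then
    let c := l.getD i default
    let k1 := kmpFall pi l c k k
    let k2 := if c = l.getD k1 default then k1 + 1 else k1
    kmpLoop l (i + 1) (pi.push k2) k2
  else pi
termination_by l.length - i

-- meta = 1; while d * d <= n: if n % d == 0: mt = n // d; break; d += 1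
def metaAux (n d : Int) : Int :=
  if d * d ≤ n then
    if PySem.Int.mod n d = 0 then PySem.Int.floordiv n d
    else metaAux n (d + 1)
  else 1
termination_by (n + 2 - d).toNat
decreasing_by
  rename_i h
  have h2 : d ≤ n + 1 := by nlinarith [mul_self_nonneg (d - 1)]
  omega

def sprawdzanie_napisu_alt (napis : String) : Bool :=
  let l := napis.toList
  let n := l.length
  if n = 0 then true
  else
    let pi := kmpLoop l 1 #[0] 0
    let okres : Int := (n : Int) - (pi.getD (n - 1) 0 : Int)
    let mt := metaAux (n : Int) 2
    decide (okres ≤ mt)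

-- ===== PRECONDITION & SPEC =====
def Spec_sprawdzanie_napisu (napis : String) (out : Bool) : Prop := out = sprawdzanie_napisu_alt napis
instance (napis : String) (out : Bool) : Decidable (Spec_sprawdzanie_napisu napis out) := by unfold Spec_sprawdzanie_napisu; infer_instance

-- ===== CLAIM (what is proved, stated in full; the proofs are below) =====
def Claim_equal_sprawdzanie_napisu : Prop := ∀ (napis : String), Dom_sprawdzanie_napisu napis → Spec_sprawdzanie_napisu napis (sprawdzanie_napisu napis)

-- ===== LEMMAS AND PROOFS =====

def isBord (l : List Char) (m k : Nat) : Prop := l.take k = (l.take m).drop (m - k)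
def lb (l : List Char) (m : Nat) : Nat :=
  Nat.findGreatest (fun k => k < m ∧ l.take k = (l.take m).drop (m - k)) m

theorem bord_zero (l : List Char) (m : Nat) : isBord l m 0 := by
  simp [isBord, List.drop_eq_nil_iff]

theorem bord_trans (l : List Char) (j k m : Nat) (hjk : j ≤ k) (hkm : k ≤ m)
    (h1 : isBord l k j) (h2 : isBord l m k) : isBord l m j := by
  unfold isBord at *
  rw [h2, List.drop_drop] at h1
  rw [h1]
  congr 1
  omega

theorem bord_chain (l : List Char) (j k m : Nat) (hjk : j ≤ k) (hkm : k ≤ m)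
    (h1 : isBord l m j) (h2 : isBord l m k) : isBord l k j := by
  unfold isBord at *
  rw [h2, List.drop_drop, h1]
  congr 1
  omega

theorem take_succ_getD (l : List Char) (m : Nat) (h : m < l.length) :
    l.take (m + 1) = l.take m ++ [l.getD m default] := by
  rw [List.take_add_one, List.getD_eq_getElem?_getD, List.getElem?_eq_getElem h]
  rfl

theorem bord_extend (l : List Char) (m j : Nat) (hm : m < l.length) (hj : j < m) :
    isBord l (m + 1) (j + 1) ↔ (isBord l m j ∧ l.getD j default = l.getD m default) := by
  unfold isBord
  have hjn : j < l.length := lt_trans hj hm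
  rw [take_succ_getD l m hm, take_succ_getD l j hjn]
  have hs : m + 1 - (j + 1) = m - j := by omega
  rw [hs, List.drop_append_of_le_length (by simp; omega)]
  constructor
  · intro h
    have := List.append_inj' h rfl
    exact ⟨this.1, by simpa using this.2⟩
  · rintro ⟨h1, h2⟩
    rw [h1, h2]

theorem lb_P (l : List Char) (m : Nat) (hm : 1 ≤ m) :
    lb l m < m ∧ isBord l m (lb l m) := by
  have h0 : (fun k => k < m ∧ l.take k = (l.take m).drop (m - k)) 0 := ⟨hm, bord_zero l m⟩
  exact Nat.findGreatest_spec (P := fun k => k < m ∧ l.take k = (l.take m).drop (m - k))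
    (Nat.zero_le m) h0

theorem lb_lt (l : List Char) (m : Nat) (hm : 1 ≤ m) : lb l m < m := (lb_P l m hm).1

theorem lb_bord (l : List Char) (m : Nat) (hm : 1 ≤ m) : isBord l m (lb l m) := (lb_P l m hm).2

theorem lb_ge (l : List Char) (m k : Nat) (hk : k < m) (hb : isBord l m k) : k ≤ lb l m := by
  exact Nat.le_findGreatest (Nat.le_of_lt hk) ⟨hk, hb⟩

theorem lb_one (l : List Char) : lb l 1 = 0 := by
  have := lb_lt l 1 le_rfl
  omega


theorem porAux_iff (l1 l2 : List Char) (i : Nat) :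
    porAux l1 l2 i = true ↔
      ∀ j, i ≤ j → j < l1.length → l1.getD j default = l2.getD (j % l2.length) default := by
  fun_induction porAux l1 l2 i with
  | case1 i hlt hne =>
    simp only [Bool.false_eq_true, false_iff]
    intro h
    exact hne (h i le_rfl hlt)
  | case2 i hlt hne ih =>
    rw [ih]
    constructor
    · intro h j hij hj
      rcases Nat.eq_or_lt_of_le hij with rfl | h'
      · by_contra hc; exact hne hc
      · exact h j h' hj
    · intro h j hij hj
      exact h j (by omega) hj
  | case3 i hge =>
    simp only [true_iff]
    intro j hij hj
    omega

theorem getD_take (l : List Char) (p j : Nat) (hj : j < p) :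
    (l.take p).getD j default = l.getD j default := by
  rw [List.getD_eq_getElem?_getD, List.getD_eq_getElem?_getD, List.getElem?_take, if_pos hj]

theorem por_take_iff (l : List Char) (p : Nat) (hp1 : 1 ≤ p) (hpn : p ≤ l.length) :
    porAux l (l.take p) 0 = true ↔
      ∀ i, i < l.length → l.getD i default = l.getD (i % p) default := by
  rw [porAux_iff]
  have hlen : (l.take p).length = p := by simp [List.length_take]; omega
  constructor
  · intro h i hi
    have := h i (Nat.zero_le i) hi
    rwa [hlen, getD_take l p _ (Nat.mod_lt _ (by omega))] at this
  · intro h j _ hj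
    rw [hlen, getD_take l p _ (Nat.mod_lt _ (by omega))]
    exact h j hj

theorem per_iff_shift (l : List Char) (p : Nat) (hp : 1 ≤ p) :
    (∀ i, i < l.length → l.getD i default = l.getD (i % p) default) ↔
      (∀ i, p ≤ i → i < l.length → l.getD i default = l.getD (i - p) default) := by
  constructor
  · intro h i hpi hi
    have h1 := h i hi
    have h2 := h (i - p) (by omega)
    have hmod : (i - p) % p = i % p := by
      conv_rhs => rw [show i = (i - p) + p by omega]
      rw [Nat.add_mod_right]
    rw [h1, h2, hmod]
  · intro h i
    induction i using Nat.strong_induction_on with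
    | _ i ih =>
      intro hi
      by_cases hip : i < p
      · rw [Nat.mod_eq_of_lt hip]
      · have h1 := h i (by omega) hi
        have h2 := ih (i - p) (by omega) (by omega)
        have hmod : (i - p) % p = i % p := by
          conv_rhs => rw [show i = (i - p) + p by omega]
          rw [Nat.add_mod_right]
        rw [h1, h2, hmod]

theorem shift_iff_bord (l : List Char) (p : Nat) (hp1 : 1 ≤ p) (hp : p ≤ l.length) :
    (∀ i, p ≤ i → i < l.length → l.getD i default = l.getD (i - p) default) ↔
      isBord l l.length (l.length - p) := by
  unfold isBord
  rw [List.take_length, show l.length - (l.length - p) = p by omega]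
  constructor
  · intro h
    apply List.ext_getElem?
    intro j
    rw [List.getElem?_take, List.getElem?_drop]
    by_cases hj : j < l.length - p
    · rw [if_pos hj]
      have hv := h (p + j) (by omega) (by omega)
      rw [List.getD_eq_getElem l default (by omega : p + j < l.length),
        show p + j - p = j by omega,
        List.getD_eq_getElem l default (by omega : j < l.length)] at hv
      rw [List.getElem?_eq_getElem (by omega : p + j < l.length),
        List.getElem?_eq_getElem (by omega : j < l.length), hv]
    · rw [if_neg hj, List.getElem?_eq_none (by omega : l.length ≤ p + j)]
  · intro h i hpi hi
    have hj : i - p < l.length - p := by omega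
    have := congrArg (fun t => t.getD (i - p) default) h
    simp only at this
    rw [List.getD_eq_getElem?_getD, List.getD_eq_getElem?_getD, List.getElem?_take, if_pos hj,
      List.getElem?_drop, show p + (i - p) = i by omega] at this
    rw [List.getD_eq_getElem?_getD, List.getD_eq_getElem?_getD]
    exact this.symm

theorem exists_bord_iff_lb (l : List Char) (mN : Nat) (hn : 1 ≤ l.length)
    (h1 : 1 ≤ mN) (h2 : mN ≤ l.length) :
    (∃ p : Nat, 1 ≤ p ∧ p ≤ mN ∧ isBord l l.length (l.length - p)) ↔
      l.length - lb l l.length ≤ mN := by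
  constructor
  · rintro ⟨p, hp1, hpm, hb⟩
    have := lb_ge l l.length (l.length - p) (by omega) hb
    omega
  · intro h
    refine ⟨l.length - lb l l.length, by have := lb_lt l l.length hn; omega, h, ?_⟩
    have hlb := lb_bord l l.length hn
    have := lb_lt l l.length hn
    rw [show l.length - (l.length - lb l l.length) = lb l l.length by omega]
    exact hlb

theorem najd_bounds (n : Int) (hn : 1 ≤ n) :
    ∀ (i : Int), 2 ≤ i → 1 ≤ najdAux n i ∧ najdAux n i ≤ n := by
  intro i
  fun_induction najdAux n i with
  | case1 i hle hmod =>
    intro hi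
    rw [PySem.Int.floordiv_eq_ediv_of_pos (by omega)]
    constructor
    · rw [Int.le_ediv_iff_mul_le (by omega)]
      nlinarith
    · exact Int.ediv_le_self i (by omega)
  | case2 i hle hmod ih =>
    intro hi
    exact ih (by omega)
  | case3 i hgt =>
    intro hi
    omega

theorem meta_eq_najd (n : Int) : ∀ (d : Int), metaAux n d = najdAux n d := by
  intro d
  fun_induction metaAux n d with
  | case1 d hle hmod => rw [najdAux, if_pos hle, if_pos hmod]
  | case2 d hle hmod ih => rw [najdAux, if_pos hle, if_neg hmod, ih]
  | case3 d hgt => rw [najdAux, if_neg hgt]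

theorem sprLoop_iff (l : List Char) (mt : Int) :
    ∀ (i : Int), 0 ≤ i →
      (sprLoop l mt i = true ↔
        ∃ p : Nat, (i : Int) < (p : Int) ∧ (p : Int) ≤ mt ∧ porAux l (l.take p) 0 = true) := by
  intro i
  fun_induction sprLoop l mt i with
  | case1 i hlt frag hpor =>
    intro h0
    simp only [true_iff]
    refine ⟨i.toNat + 1, by omega, by push_cast; omega, ?_⟩
    have hf : frag = l.take (i + 1).toNat := PySem.List.slice_to l (by omega)
    rw [hf] at hpor
    rw [show i.toNat + 1 = (i + 1).toNat by omega]
    exact hpor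
  | case2 i hlt frag hpor ih =>
    intro h0
    rw [ih (by omega)]
    have hf : frag = l.take (i + 1).toNat := PySem.List.slice_to l (by omega)
    rw [hf] at hpor
    constructor
    · rintro ⟨p, hp1, hp2, hp3⟩
      exact ⟨p, by omega, hp2, hp3⟩
    · rintro ⟨p, hp1, hp2, hp3⟩
      refine ⟨p, ?_, hp2, hp3⟩
      rcases lt_or_eq_of_le (show i + 1 ≤ (p : Int) by omega) with h | h
      · exact h
      · exfalso
        rw [show p = (i + 1).toNat by omega] at hp3
        rw [hp3] at hpor
        exact hpor rfl
  | case3 i hge =>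
    intro h0
    simp only [Bool.false_eq_true, false_iff]
    rintro ⟨p, hp1, hp2, _⟩
    omega

theorem kmpFall_correct (l : List Char) (i : Nat) (hi : i < l.length) (hi1 : 1 ≤ i)
    (pi : Array Nat) (hsz : pi.size = i) (hpi : ∀ j, j < i → pi.getD j 0 = lb l (j + 1)) :
    ∀ fuel k, k ≤ fuel → isBord l i k → k < i →
      (∀ j, k < j → j < i → isBord l i j → l.getD j default ≠ l.getD i default) →
      (isBord l i (kmpFall pi l (l.getD i default) fuel k) ∧
       kmpFall pi l (l.getD i default) fuel k < i ∧
       (∀ j, kmpFall pi l (l.getD i default) fuel k < j → j < i → isBord l i j →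
          l.getD j default ≠ l.getD i default) ∧
       (kmpFall pi l (l.getD i default) fuel k = 0 ∨
        l.getD (kmpFall pi l (l.getD i default) fuel k) default = l.getD i default)) := by
  intro fuel
  induction fuel with
  | zero =>
    intro k hk hb hki hfail
    have hk0 : k = 0 := by omega
    subst hk0
    exact ⟨hb, hki, hfail, Or.inl rfl⟩
  | succ fuel ih =>
    intro k hk hb hki hfail
    rw [kmpFall]
    by_cases hc : 0 < k ∧ l.getD i default ≠ l.getD k default
    · rw [if_pos hc]
      obtain ⟨hk0, hne⟩ := hc
      have hpik : pi.getD (k - 1) 0 = lb l k := by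
        have := hpi (k - 1) (by omega)
        rwa [show k - 1 + 1 = k by omega] at this
      rw [hpik]
      have hlbk : lb l k < k := lb_lt l k (by omega)
      have hbk : isBord l k (lb l k) := lb_bord l k (by omega)
      apply ih
      · omega
      · exact bord_trans l (lb l k) k i (by omega) (by omega) hbk hb
      · omega
      · intro j hj1 hj2 hbj
        rcases lt_trichotomy j k with hjk | hjk | hjk
        · exfalso
          have hjb : isBord l k j := bord_chain l j k i (by omega) (by omega) hbj hb
          have := lb_ge l k j hjk hjb
          omega
        · subst hjk
          intro hcon
          exact hne hcon.symm
        · exact hfail j hjk hj2 hbj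
    · rw [if_neg hc]
      push_neg at hc
      refine ⟨hb, hki, hfail, ?_⟩
      by_cases hk0 : k = 0
      · exact Or.inl hk0
      · exact Or.inr (hc (by omega)).symm

theorem lb_succ_matched (l : List Char) (i k : Nat) (hi : i < l.length) (hk : k < i)
    (hb : isBord l i k)
    (hfail : ∀ j, k < j → j < i → isBord l i j → l.getD j default ≠ l.getD i default)
    (hm : l.getD k default = l.getD i default) : lb l (i + 1) = k + 1 := by
  have hbs : isBord l (i + 1) (k + 1) := (bord_extend l i k hi hk).mpr ⟨hb, hm⟩
  have hle : k + 1 ≤ lb l (i + 1) := lb_ge l (i + 1) (k + 1) (by omega) hbs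
  have hge : lb l (i + 1) ≤ k + 1 := by
    by_contra hcon
    push_neg at hcon
    have h1 : 1 ≤ lb l (i + 1) := by omega
    have hlt : lb l (i + 1) < i + 1 := lb_lt l (i + 1) (by omega)
    have hbb : isBord l (i + 1) (lb l (i + 1)) := lb_bord l (i + 1) (by omega)
    obtain ⟨j, hj⟩ : ∃ j, lb l (i + 1) = j + 1 := ⟨lb l (i + 1) - 1, by omega⟩
    rw [hj] at hbb
    have hji : j < i := by omega
    have := (bord_extend l i j hi hji).mp hbb
    exact hfail j (by omega) hji this.1 this.2
  omega

theorem lb_succ_unmatched (l : List Char) (i : Nat) (hi : i < l.length) (hi1 : 1 ≤ i)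
    (hfail : ∀ j, 0 < j → j < i → isBord l i j → l.getD j default ≠ l.getD i default)
    (hnm : l.getD 0 default ≠ l.getD i default) : lb l (i + 1) = 0 := by
  by_contra hcon
  have h1 : 1 ≤ lb l (i + 1) := by omega
  have hlt : lb l (i + 1) < i + 1 := lb_lt l (i + 1) (by omega)
  have hbb : isBord l (i + 1) (lb l (i + 1)) := lb_bord l (i + 1) (by omega)
  obtain ⟨j, hj⟩ : ∃ j, lb l (i + 1) = j + 1 := ⟨lb l (i + 1) - 1, by omega⟩
  rw [hj] at hbb
  have hji : j < i := by omega
  have hext := (bord_extend l i j hi hji).mp hbb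
  by_cases hj0 : j = 0
  · subst hj0
    exact hnm hext.2
  · exact hfail j (by omega) hji hext.1 hext.2

theorem kmpLoop_correct (l : List Char) :
    ∀ (i : Nat) (pi : Array Nat) (k : Nat), 1 ≤ i → i ≤ l.length →
      pi.size = i → (∀ j, j < i → pi.getD j 0 = lb l (j + 1)) → k = lb l i →
      ((kmpLoop l i pi k).size = l.length ∧
        ∀ j, j < l.length → (kmpLoop l i pi k).getD j 0 = lb l (j + 1)) := by
  intro i pi k
  fun_induction kmpLoop l i pi k with
  | case1 i pi k hlt c k1 k2 ih =>
    intro hi1 hile hsz hpi hk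
    have hbk : isBord l i k := hk ▸ lb_bord l i hi1
    have hki : k < i := hk ▸ lb_lt l i hi1
    have hfail0 : ∀ j, k < j → j < i → isBord l i j → l.getD j default ≠ l.getD i default := by
      intro j hj1 hj2 hbj
      exfalso
      have := lb_ge l i j hj2 hbj
      omega
    have hfall := kmpFall_correct l i hlt hi1 pi hsz hpi k k le_rfl hbk hki hfail0
    have hk1e : kmpFall pi l (l.getD i default) k k = k1 := rfl
    rw [hk1e] at hfall
    have hk2 : k2 = lb l (i + 1) := by
      show (if c = l.getD k1 default then k1 + 1 else k1) = lb l (i + 1)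
      by_cases hmatch : c = l.getD k1 default
      · rw [if_pos hmatch]
        exact (lb_succ_matched l i k1 hlt hfall.2.1 hfall.1 hfall.2.2.1 hmatch.symm).symm
      · rw [if_neg hmatch]
        rcases hfall.2.2.2 with h0 | hm
        · rw [h0] at hfall hmatch ⊢
          exact (lb_succ_unmatched l i hlt hi1 hfall.2.2.1 (fun hc => hmatch hc.symm)).symm
        · exact absurd hm.symm hmatch
    apply ih
    · omega
    · omega
    · simp [Array.size_push, hsz]
    · intro j hj
      by_cases hji : j < i
      · rw [Array.getD_eq_getD_getElem?, Array.getElem?_push, if_neg (by omega), ← Array.getD_eq_getD_getElem?]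
        exact hpi j hji
      · have hji' : j = i := by omega
        subst hji'
        rw [Array.getD_eq_getD_getElem?, Array.getElem?_push, if_pos hsz.symm]
        exact hk2
    · exact hk2
  | case2 i pi k hge =>
    intro hi1 hile hsz hpi hk
    refine ⟨by omega, ?_⟩
    intro j hj
    exact hpi j (by omega)

theorem main_eq (napis : String) : sprawdzanie_napisu napis = sprawdzanie_napisu_alt napis := by
  show sprLoop napis.toList (najdAux ((napis.toList.length : Int)) 2) 0 =
    (if napis.toList.length = 0 then true
     else decide (((napis.toList.length : Int) -
        ((kmpLoop napis.toList 1 #[0] 0).getD (napis.toList.length - 1) 0 : Int)) ≤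
          metaAux ((napis.toList.length : Int)) 2))
  set l := napis.toList with hl
  by_cases h0 : l.length = 0
  · rw [if_pos h0]
    have hl0 : l = [] := List.eq_nil_of_length_eq_zero h0
    rw [hl0]
    have hnajd : najdAux ((List.length ([] : List Char) : Int)) 2 = 1 := by
      rw [najdAux]
      norm_num
    rw [hnajd, sprLoop, if_pos (by norm_num : (0 : Int) < 1)]
    have hfrag : PySem.List.slice ([] : List Char) none (some (0 + 1)) = [] := by
      rw [PySem.List.slice_to _ (by norm_num)]
      simp
    rw [hfrag]
    simp [porAux]
  · rw [if_neg h0]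
    have hn : 1 ≤ l.length := by omega
    have hb := najd_bounds ((l.length : Int)) (by exact_mod_cast hn) 2 (by norm_num)
    set mt := najdAux ((l.length : Int)) 2 with hmt
    have hkmp := kmpLoop_correct l 1 #[0] 0 le_rfl hn (by simp)
      (by
        intro j hj
        have hj0 : j = 0 := by omega
        subst hj0
        simpa using (lb_one l).symm)
      (lb_one l).symm
    have hpin : (kmpLoop l 1 #[0] 0).getD (l.length - 1) 0 = lb l l.length := by
      have := hkmp.2 (l.length - 1) (by omega)
      rwa [show l.length - 1 + 1 = l.length by omega] at this
    rw [meta_eq_najd ((l.length : Int)) 2, ← hmt, hpin]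
    have hlbn : lb l l.length < l.length := lb_lt l l.length hn
    set mN := mt.toNat with hmN
    have hmtN : mt = (mN : Int) := (Int.toNat_of_nonneg (by omega)).symm
    have hmN1 : 1 ≤ mN := by omega
    have hmNn : mN ≤ l.length := by
      have := hb.2
      omega
    have hchain : ∀ p : Nat, 1 ≤ p → p ≤ l.length →
        (porAux l (l.take p) 0 = true ↔ isBord l l.length (l.length - p)) := by
      intro p hp1 hpl
      rw [por_take_iff l p hp1 hpl, per_iff_shift l p hp1, shift_iff_bord l p hp1 hpl]
    rw [Bool.eq_iff_iff, sprLoop_iff l mt 0 le_rfl, decide_eq_true_iff]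
    constructor
    · rintro ⟨p, hp0, hple, hpor⟩
      have hp1 : 1 ≤ p := by omega
      have hpl : p ≤ l.length := by
        have := hb.2
        omega
      have hbord := (hchain p hp1 hpl).mp hpor
      have hex := (exists_bord_iff_lb l mN hn hmN1 hmNn).mp ⟨p, hp1, by omega, hbord⟩
      omega
    · intro hle
      have hNat : l.length - lb l l.length ≤ mN := by omega
      obtain ⟨p, hp1, hpm, hbord⟩ := (exists_bord_iff_lb l mN hn hmN1 hmNn).mpr hNat
      exact ⟨p, by exact_mod_cast hp1, by omega, (hchain p hp1 (by omega)).mpr hbord⟩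

-- ===== VERDICT (by name: the statement is the Claim_ definition above) =====
theorem sprawdzanie_napisu_spec : Claim_equal_sprawdzanie_napisu := by
  intro napis _
  exact main_eq napis
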